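-- pv_equiv track=rewrite | github.com/kaushikkishore/interview-preparation | src/call/sumo_logic.py | count_substrings_with_k_freq_optimized
-- ===== SOURCE A (Python) =====
-- from collections import Counter
--
-- def count_substrings_with_k_freq_optimized(s, k):
--     """
--     Find the number of substrings in which all different characters occur exactly k times.
--     Optimized version that stops checking when a character exceeds k occurrences.
--
--     Args:
--         s (str): The input string
--         k (int): The required frequency of each character
--
--     Returns:
--         int: The number of valid substrings
--     """
--     if not s or k <= 0:
--         return 0
--
--     result = 0
--     n = len(s)
--
--     for start in range(n):
--         char_count = Counter()
--
--         for end in range(start, n):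
--             # Add current character
--             char_count[s[end]] += 1
--
--             # If any character exceeds k, this and longer substrings won't be valid
--             if char_count[s[end]] > k:
--                 break
--
--             # Check if all characters have exactly k occurrences
--             if all(count == k for count in char_count.values()):
--                 result += 1
--
--     return result
-- ===== SOURCE B (Python) =====
-- def count_substrings_with_k_freq_optimized(s, k):
--     """Sliding fixed-size windows: for each possible number d of distinct
--     characters, slide a window of length d*k while maintaining character
--     counts and the number of characters occurring exactly k times."""
--     if k <= 0:
--         return 0
--     n = len(s)
--     max_d = len(set(s))
--     total = 0
--     for d in range(1, max_d + 1):
--         w = d * k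
--         if w > n:
--             break
--         count = {}
--         at_k = 0
--         for i in range(n):
--             c = s[i]
--             count[c] = count.get(c, 0) + 1
--             if count[c] == k:
--                 at_k += 1
--             elif count[c] == k + 1:
--                 at_k -= 1
--             if i >= w:
--                 o = s[i - w]
--                 count[o] = count[o] - 1
--                 if count[o] == k:
--                     at_k += 1
--                 elif count[o] == k - 1:
--                     at_k -= 1
--             if i >= w - 1 and at_k == d:
--                 total += 1
--     return total
-- ===== Notes on version B (the rewrite author's own statement) =====
-- stated objective: faster
-- what changed: Replaces A's per-start incremental-Counter scan with break (quadratic in the worst case) by, for each possible distinct-character count d, one sliding window of fixed length d*k that maintains character counts and the number of characters occurring exactly k times.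
import Mathlib
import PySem

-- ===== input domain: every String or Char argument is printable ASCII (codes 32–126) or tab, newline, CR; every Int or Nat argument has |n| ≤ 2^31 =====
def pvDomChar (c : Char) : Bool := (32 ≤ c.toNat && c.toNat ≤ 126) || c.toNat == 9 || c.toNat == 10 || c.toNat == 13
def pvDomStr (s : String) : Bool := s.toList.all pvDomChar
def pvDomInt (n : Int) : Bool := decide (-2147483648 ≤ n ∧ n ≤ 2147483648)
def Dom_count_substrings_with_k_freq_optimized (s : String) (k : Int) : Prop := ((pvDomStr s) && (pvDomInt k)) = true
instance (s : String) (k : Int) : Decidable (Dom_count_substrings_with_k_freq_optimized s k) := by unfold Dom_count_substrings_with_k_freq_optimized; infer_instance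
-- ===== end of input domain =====

-- B replaces A's per-start incremental-Counter scan (with break) by, for each possible
-- distinct-character count d, one sliding window of fixed length d*k maintaining character
-- counts and the number of characters occurring exactly k times (objective: faster).

-- ===== PORT A =====
-- inner loop 'for end in range(start, n)' of A, walking the suffix s[start:]; returns on break
def pvInnerA (k : Int) : List Char → PySem.Dict Char Int → Int → Int
  | [], _, res => res
  | c :: rest, cnt, res =>
    let cnt' := cnt.modify c 0 (· + 1)
    if cnt'.getD c 0 > k then res
    else if cnt'.values.all (fun v => v == k) then pvInnerA k rest cnt' (res + 1)
    else pvInnerA k rest cnt' res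
def count_substrings_with_k_freq_optimized (s : String) (k : Int) : Int :=
  if s.toList = [] ∨ k ≤ 0 then 0
  else
    (List.range s.toList.length).foldl
      (fun res start => pvInnerA k (s.toList.drop start) PySem.Dict.empty res) 0

-- ===== PORT B =====
-- one step of B's inner loop 'for i in range(n)' (p = (i, s[i])); state (count, at_k, total)
def pvStepB (t : List Char) (k w d : Int)
    (st : PySem.Dict Char Int × Int × Int) (p : Int × Char) :
    PySem.Dict Char Int × Int × Int :=
  let i := p.1
  let c := p.2
  let cnt := st.1.insert c (st.1.getD c 0 + 1)
  let atk := if cnt.getD c 0 = k then st.2.1 + 1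
             else if cnt.getD c 0 = k + 1 then st.2.1 - 1 else st.2.1
  let cnt2 := if i ≥ w then
      let o := PySem.List.pyGetD t (i - w) ' '
      cnt.insert o (cnt.getD o 0 - 1)
    else cnt
  let atk2 := if i ≥ w then
      let o := PySem.List.pyGetD t (i - w) ' '
      if cnt2.getD o 0 = k then atk + 1
      else if cnt2.getD o 0 = k - 1 then atk - 1 else atk
    else atk
  let tot := if i ≥ w - 1 ∧ atk2 = d then st.2.2 + 1 else st.2.2
  (cnt2, atk2, tot)
def pvOuterB (t : List Char) (k : Int) : List Int → Int → Int
  | [], total => total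
  | d :: rest, total =>
    let w := d * k
    if w > (t.length : Int) then total
    else
      pvOuterB t k rest
        (((PySem.List.enumerate t).foldl (pvStepB t k w d)
          (PySem.Dict.empty, 0, total)).2.2)
def count_substrings_with_k_freq_optimized_alt (s : String) (k : Int) : Int :=
  if k ≤ 0 then 0
  else
    pvOuterB s.toList k
      (PySem.List.pyRange 1 (PySem.Set.len (PySem.Set.ofList s.toList) + 1) 1) 0

-- ===== PRECONDITION & SPEC =====
def Spec_count_substrings_with_k_freq_optimized (s : String) (k : Int) (out : Int) : Prop := out = count_substrings_with_k_freq_optimized_alt s k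
instance (s : String) (k : Int) (out : Int) : Decidable (Spec_count_substrings_with_k_freq_optimized s k out) := by unfold Spec_count_substrings_with_k_freq_optimized; infer_instance

-- ===== CLAIM (what is proved, stated in full; the proofs are below) =====
def Claim_equal_count_substrings_with_k_freq_optimized : Prop := ∀ (s : String) (k : Int), Dom_count_substrings_with_k_freq_optimized s k → Spec_count_substrings_with_k_freq_optimized s k (count_substrings_with_k_freq_optimized s k)

-- ===== LEMMAS AND PROOFS =====

-- a substring is counted iff every character occurring in it occurs exactly k times
def pvV (k : Int) (l : List Char) : Bool := l.all (fun c => (l.count c : Int) == k)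

-- the window of B's width-w pass that ends after m processed characters
def pvWinL (t : List Char) (w m : Nat) : List Char := (t.take m).drop (m - w)

-- "the width-w substring starting at i fits and is valid"
def pvP (K : Nat) (t : List Char) (w i : Nat) : Bool :=
  decide (i + w ≤ t.length) && pvV (K : Int) ((t.drop i).take w)

-- number of valid substrings of width w
def pvCnt (K : Nat) (t : List Char) (w : Nat) : Nat := (List.range t.length).countP (pvP K t w)

-- number of valid substrings starting at i (what A's inner loop counts)
def pvCA (K : Nat) (t : List Char) (i : Nat) : Nat :=
  (List.range (t.length - i)).countP (fun e => pvV (K : Int) ((t.drop i).take (e + 1)))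

lemma pvCountP_nodup_card {α : Type} [DecidableEq α] (u : List α) (hu : u.Nodup) (p : α → Bool) :
    u.countP p = (u.toFinset.filter (fun a => p a = true)).card := by
  rw [List.countP_eq_length_filter, ← List.toFinset_filter,
    List.toFinset_card_of_nodup (hu.filter p)]

lemma pvCountP_range_sum (n : Nat) (p : Nat → Bool) :
    (List.range n).countP p = ∑ i ∈ Finset.range n, if p i then 1 else 0 := by
  rw [pvCountP_nodup_card (List.range n) List.nodup_range, List.toFinset_range]
  simp [Finset.sum_boole]

lemma pvV_iff (k : Int) (l : List Char) : pvV k l = true ↔ ∀ c ∈ l, (l.count c : Int) = k := by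
  simp [pvV]

lemma pvV_length (K : Nat) (l : List Char) (hv : pvV (K : Int) l = true) :
    l.length = l.toFinset.card * K := by
  rw [← List.sum_toFinset_count_eq_length]
  rw [Finset.sum_congr rfl (fun c hc => ?_), Finset.sum_const, smul_eq_mul]
  have h2 := (pvV_iff _ _ |>.mp hv) c (List.mem_toFinset.mp hc)
  exact_mod_cast h2

lemma pvD_eq (t : List Char) : (PySem.Set.ofList t).length = t.toFinset.card := by
  have h1 : (PySem.Set.ofList t).toFinset = t.toFinset := by
    ext c; simp [PySem.Set.mem_ofList]
  rw [← h1, List.toFinset_card_of_nodup (PySem.Set.nodup_ofList t)]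

lemma pvCountP_flip {α : Type} (u : List α) (hu : u.Nodup) (c : α) (hc : c ∈ u) (p p' : α → Bool)
    (h : ∀ x ∈ u, x ≠ c → p' x = p x) :
    ((u.countP p' : Int)) = u.countP p + (if p' c then 1 else 0) - (if p c then 1 else 0) := by
  induction u with
  | nil => simp at hc
  | cons x rest ih =>
    rcases List.mem_cons.mp hc with rfl | hcr
    · have hnc : c ∉ rest := (List.nodup_cons.mp hu).1
      have : rest.countP p' = rest.countP p :=
        List.countP_congr (fun a ha => by rw [h a (List.mem_cons_of_mem _ ha) (fun hac => hnc (hac ▸ ha))])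
      simp only [List.countP_cons, this]
      by_cases h1 : p' c <;> by_cases h2 : p c <;> simp [h1, h2]
    · have hxc : x ≠ c := by
        rintro rfl; exact (List.nodup_cons.mp hu).1 hcr
      have hx : p' x = p x := h x (List.mem_cons_self) hxc
      have := ih (List.nodup_cons.mp hu).2 hcr (fun a ha hac => h a (List.mem_cons_of_mem _ ha) hac)
      simp only [List.countP_cons, hx]
      by_cases h1 : p x <;> simp [h1] <;> push_cast [this] <;> ring

lemma pvAtk_iff (K dN : Nat) (hK : 1 ≤ K) (u l : List Char) (hu : u.Nodup)
    (hsub : ∀ c ∈ l, c ∈ u) (hlen : l.length = dN * K) :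
    (u.countP (fun c => l.count c == K) = dN) ↔ pvV (K : Int) l = true := by
  rw [pvCountP_nodup_card u hu, pvV_iff]
  have hF : (u.toFinset.filter (fun a => (l.count a == K) = true)) =
      (u.toFinset.filter (fun a => l.count a = K)) := by
    apply Finset.filter_congr; intro a _; simp
  rw [hF]
  set F := u.toFinset.filter (fun a => l.count a = K) with hFdef
  have hFsub : F ⊆ l.toFinset := by
    intro c hcF
    rw [List.mem_toFinset, ← List.count_pos_iff]
    have := (Finset.mem_filter.mp hcF).2
    omega
  have hsum : ∑ c ∈ l.toFinset, l.count c = dN * K := by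
    rw [List.sum_toFinset_count_eq_length]; exact hlen
  constructor
  · intro hcard c hcl
    have hFsum : ∑ c ∈ F, l.count c = dN * K := by
      rw [Finset.sum_congr rfl (fun a ha => (Finset.mem_filter.mp ha).2), Finset.sum_const,
        smul_eq_mul, hcard]
    have hdiff : ∑ c ∈ l.toFinset \ F, l.count c = 0 := by
      have h2 := Finset.sum_sdiff (f := fun c => l.count c) hFsub
      simp only at h2
      omega
    have hcF : c ∈ F := by
      by_contra hns
      have hmem : c ∈ l.toFinset \ F := Finset.mem_sdiff.mpr ⟨List.mem_toFinset.mpr hcl, hns⟩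
      have hzero : l.count c = 0 := by
        have := (Finset.sum_eq_zero_iff.mp hdiff) c hmem
        omega
      have := List.count_pos_iff.mpr hcl
      omega
    have := (Finset.mem_filter.mp hcF).2
    exact_mod_cast this
  · intro hall
    have hFeq : F = l.toFinset := by
      apply Finset.Subset.antisymm hFsub
      intro c hcl
      rw [List.mem_toFinset] at hcl
      exact Finset.mem_filter.mpr ⟨List.mem_toFinset.mpr (hsub c hcl),
        by exact_mod_cast hall c hcl⟩
    have : ∑ c ∈ F, l.count c = F.card * K := by
      rw [Finset.sum_congr rfl (fun a ha => (Finset.mem_filter.mp ha).2), Finset.sum_const,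
        smul_eq_mul]
    rw [hFeq] at this ⊢
    rw [hsum] at this
    exact Nat.eq_of_mul_eq_mul_right hK this.symm

lemma pvValuesAll_counter (k : Int) (q : List Char) :
    (PySem.Dict.counter q).values.all (fun v => v == k) = pvV k q := by
  have hv : (PySem.Dict.counter q).values
      = (PySem.Set.ofList q).map (fun c => ((q.count c : Int))) := by
    show ((PySem.Dict.counter q).items).map (·.2) = _
    rw [PySem.Dict.items_counter]
    simp [List.map_map, Function.comp_def]
  rw [hv, List.all_map, Bool.eq_iff_iff]
  simp only [List.all_eq_true, Function.comp_apply, pvV, PySem.Set.mem_ofList]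

lemma pvInnerA_spec (K : Nat) (l : List Char) : ∀ (q : List Char) (res : Int),
    (∀ c, ((q.count c : Int) ≤ (K : Int))) →
    pvInnerA (K : Int) l (PySem.Dict.counter q) res
      = res + ((List.range l.length).countP (fun e => pvV (K : Int) (q ++ l.take (e + 1))) : Int) := by
  induction l with
  | nil => intro q res hq; simp [pvInnerA]
  | cons c rest ih =>
    intro q res hq
    rw [pvInnerA]
    simp only [← PySem.Dict.counter_append_singleton, PySem.Dict.getD_counter,
      pvValuesAll_counter]
    have hcount : (q ++ [c]).count c = q.count c + 1 := by simp
    by_cases hbr : ((q ++ [c]).count c : Int) > (K : Int)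
    · rw [if_pos hbr]
      have hzero : (List.range (c :: rest).length).countP
          (fun e => pvV (K : Int) (q ++ (c :: rest).take (e + 1))) = 0 := by
        rw [List.countP_eq_zero]
        intro e _
        simp only [List.take_succ_cons, pvV, Bool.not_eq_true, List.all_eq_false]
        refine ⟨c, by simp, ?_⟩
        have hge : (q ++ [c]).count c ≤ (q ++ c :: List.take e rest).count c := by
          simp
        rw [beq_eq_false_iff_ne]
        intro heq
        omega
      rw [hzero]; simp
    · rw [if_neg hbr]
      have hq' : ∀ x, (((q ++ [c]).count x : Int) ≤ (K : Int)) := by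
        intro x
        by_cases hx : x = c
        · subst hx; omega
        · have hcx : (q ++ [c]).count x = q.count x := by
            rw [List.count_append, List.count_singleton]
            simp [Ne.symm hx]
          rw [hcx]; exact hq x
      have hfun : ((fun e => pvV (K : Int) (q ++ (c :: rest).take (e + 1))) ∘ Nat.succ)
          = (fun e => pvV (K : Int) ((q ++ [c]) ++ rest.take (e + 1))) := by
        funext e
        simp [List.take_succ_cons]
      have hrange : (List.range (c :: rest).length).countP
            (fun e => pvV (K : Int) (q ++ (c :: rest).take (e + 1)))
          = (if pvV (K : Int) (q ++ [c]) then 1 else 0)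
            + (List.range rest.length).countP
                (fun e => pvV (K : Int) ((q ++ [c]) ++ rest.take (e + 1))) := by
        show (List.range (rest.length + 1)).countP _ = _
        rw [List.range_succ_eq_map, List.countP_cons, List.countP_map, hfun]
        have h0 : (q ++ (c :: rest).take (0 + 1)) = q ++ [c] := by simp
        rw [h0]
        omega
      by_cases hval : pvV (K : Int) (q ++ [c]) = true
      · rw [if_pos hval, ih (q ++ [c]) (res + 1) hq', hrange, if_pos hval]
        push_cast; ring
      · rw [if_neg hval, ih (q ++ [c]) res hq', hrange, if_neg hval]
        push_cast; ring

lemma pvA_sum (K : Nat) (t : List Char) (N : Nat) (res : Int) :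
    (List.range N).foldl (fun res start => pvInnerA (K : Int) (t.drop start) PySem.Dict.empty res) res
      = res + ∑ i ∈ Finset.range N, (pvCA K t i : Int) := by
  induction N generalizing res with
  | zero => simp
  | succ N ih =>
    rw [List.range_succ, List.foldl_append, ih, Finset.sum_range_succ]
    have hemp : (PySem.Dict.empty : PySem.Dict Char Int) = PySem.Dict.counter [] := rfl
    simp only [List.foldl_cons, List.foldl_nil, hemp]
    rw [pvInnerA_spec K _ [] _ (fun c => by simp)]
    simp only [List.nil_append, pvCA, List.length_drop]
    ring

lemma pvCA_eq (K : Nat) (hK : 1 ≤ K) (t : List Char) (i : Nat) :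
    pvCA K t i = ∑ d ∈ Finset.range ((PySem.Set.ofList t).length),
      if pvP K t ((1 + d) * K) i then 1 else 0 := by
  rw [pvD_eq]
  have hL : pvCA K t i
      = ((Finset.range (t.length - i)).filter
          (fun e => pvV (K : Int) ((t.drop i).take (e + 1)) = true)).card := by
    rw [pvCA, List.countP_eq_length_filter, ← List.toFinset_card_of_nodup
      ((List.nodup_range).filter _), List.toFinset_filter, List.toFinset_range]
  have hR : (∑ d ∈ Finset.range t.toFinset.card, if pvP K t ((1 + d) * K) i then 1 else 0)
      = ((Finset.range t.toFinset.card).filter (fun d => pvP K t ((1 + d) * K) i = true)).card := by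
    rw [Finset.sum_boole]; simp
  rw [hL, hR]
  apply Finset.card_nbij' (fun e => (e + 1) / K - 1) (fun d => (1 + d) * K - 1)
  · -- forward maps-to
    intro e he
    simp only [Finset.coe_filter, Set.mem_setOf_eq, Finset.mem_range] at he ⊢
    obtain ⟨helt, hev⟩ := he
    set l := (t.drop i).take (e + 1) with hl
    have hlen : l.length = e + 1 := by
      simp [hl, List.length_take, List.length_drop]
      omega
    have hlc : e + 1 = l.toFinset.card * K := by rw [← pvV_length K l hev, hlen]
    have hcpos : 1 ≤ l.toFinset.card := by
      by_contra hcp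
      have h0 : l.toFinset.card = 0 := by omega
      rw [h0, Nat.zero_mul] at hlc
      omega
    have hcsub : l.toFinset ⊆ t.toFinset := by
      intro c hc
      rw [List.mem_toFinset] at hc ⊢
      exact List.mem_of_mem_drop (List.mem_of_mem_take hc)
    have hcle : l.toFinset.card ≤ t.toFinset.card := Finset.card_le_card hcsub
    have hdiv : (e + 1) / K = l.toFinset.card := by
      rw [hlc, Nat.mul_div_cancel _ hK]
    constructor
    · omega
    · have h1d : (1 + ((e + 1) / K - 1)) * K = e + 1 := by
        rw [hdiv]
        have : 1 + (l.toFinset.card - 1) = l.toFinset.card := by omega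
        rw [this, ← hlc]
      rw [pvP, h1d]
      simp only [Bool.and_eq_true, decide_eq_true_eq]
      exact ⟨by omega, hev⟩
  · -- backward maps-to
    intro d hd
    simp only [Finset.coe_filter, Set.mem_setOf_eq, Finset.mem_range] at hd ⊢
    obtain ⟨hdlt, hdp⟩ := hd
    rw [pvP] at hdp
    simp only [Bool.and_eq_true, decide_eq_true_eq] at hdp
    obtain ⟨hfit, hval⟩ := hdp
    have hw1 : 1 ≤ (1 + d) * K := Nat.mul_pos (by omega) hK
    constructor
    · omega
    · have : (1 + d) * K - 1 + 1 = (1 + d) * K := by omega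
      rw [this]
      exact hval
  · -- left inverse
    intro e he
    simp only [Finset.coe_filter, Set.mem_setOf_eq, Finset.mem_range] at he
    obtain ⟨helt, hev⟩ := he
    set l := (t.drop i).take (e + 1) with hl
    have hlen : l.length = e + 1 := by
      simp [hl, List.length_take, List.length_drop]; omega
    have hlc : e + 1 = l.toFinset.card * K := by rw [← pvV_length K l hev, hlen]
    have hcpos : 1 ≤ l.toFinset.card := by
      by_contra hcp
      have h0 : l.toFinset.card = 0 := by omega
      rw [h0, Nat.zero_mul] at hlc
      omega
    have hdiv : (e + 1) / K = l.toFinset.card := by rw [hlc, Nat.mul_div_cancel _ hK]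
    show (1 + ((e + 1) / K - 1)) * K - 1 = e
    rw [hdiv]
    have h2 : 1 + (l.toFinset.card - 1) = l.toFinset.card := by omega
    rw [h2, ← hlc]
    omega
  · -- right inverse
    intro d hd
    simp only [Finset.coe_filter, Set.mem_setOf_eq, Finset.mem_range] at hd
    have hw1 : 1 ≤ (1 + d) * K := Nat.mul_pos (by omega) hK
    show ((1 + d) * K - 1 + 1) / K - 1 = d
    have h1 : (1 + d) * K - 1 + 1 = (1 + d) * K := by omega
    rw [h1, Nat.mul_div_cancel _ hK]
    omega

lemma pvCnt_zero_of_big (K w : Nat) (t : List Char) (h : t.length < w) : pvCnt K t w = 0 := by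
  rw [pvCnt, List.countP_eq_zero]
  intro i _
  simp only [pvP, Bool.and_eq_true, decide_eq_true_eq, not_and]
  intro hfit
  omega

lemma pvWinL_eq (t : List Char) (w m : Nat) (hm : w ≤ m) :
    pvWinL t w m = (t.drop (m - w)).take w := by
  rw [pvWinL, List.drop_take]
  congr 1
  omega

lemma pvCntE_eq (K w : Nat) (hw : 1 ≤ w) (t : List Char) :
    (List.range t.length).countP
        (fun e => decide (w ≤ e + 1) && pvV (K : Int) (pvWinL t w (e + 1))) = pvCnt K t w := by
  rw [pvCnt, List.countP_eq_length_filter, List.countP_eq_length_filter,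
    ← List.toFinset_card_of_nodup ((List.nodup_range).filter _),
    ← List.toFinset_card_of_nodup ((List.nodup_range).filter _),
    List.toFinset_filter, List.toFinset_filter, List.toFinset_range]
  apply Finset.card_nbij' (fun e => e + 1 - w) (fun i => i + w - 1)
  · intro e he
    simp only [Finset.coe_filter, Set.mem_setOf_eq, Finset.mem_range, Bool.and_eq_true,
      decide_eq_true_eq] at he ⊢
    obtain ⟨hlt, hle, hval⟩ := he
    rw [pvWinL_eq t w (e + 1) hle] at hval
    refine ⟨by omega, ?_⟩
    rw [pvP]
    simp only [Bool.and_eq_true, decide_eq_true_eq]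
    exact ⟨by omega, hval⟩
  · intro i hi
    simp only [Finset.coe_filter, Set.mem_setOf_eq, Finset.mem_range, Bool.and_eq_true,
      decide_eq_true_eq] at hi ⊢
    obtain ⟨hlt, hip⟩ := hi
    rw [pvP] at hip
    simp only [Bool.and_eq_true, decide_eq_true_eq] at hip
    obtain ⟨hfit, hval⟩ := hip
    refine ⟨by omega, by omega, ?_⟩
    rw [pvWinL_eq t w (i + w - 1 + 1) (by omega)]
    have h1 : i + w - 1 + 1 - w = i := by omega
    rw [h1]
    exact hval
  · intro e he
    simp only [Finset.coe_filter, Set.mem_setOf_eq, Finset.mem_range, Bool.and_eq_true,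
      decide_eq_true_eq] at he
    show e + 1 - w + w - 1 = e
    omega
  · intro i hi
    simp only [Finset.coe_filter, Set.mem_setOf_eq, Finset.mem_range] at hi
    rw [pvP] at hi
    simp only [Bool.and_eq_true, decide_eq_true_eq] at hi
    show i + w - 1 + 1 - w = i
    omega

lemma pvWinL_len (t : List Char) (w m : Nat) (hm : m ≤ t.length) (hw : w ≤ m) :
    (pvWinL t w m).length = w := by
  simp [pvWinL, List.length_drop, List.length_take]
  omega

lemma pvWinL_sub (t : List Char) (w m : Nat) : ∀ x ∈ pvWinL t w m, x ∈ t := by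
  intro x hx
  exact List.mem_of_mem_take (List.mem_of_mem_drop hx)

lemma pvTot_eq (t : List Char) (K dN w m : Nat) (hK : 1 ≤ K) (hdw : w = dN * K)
    (hm1 : m + 1 ≤ t.length) (atk2 total : Int)
    (hatk2 : atk2 = (((PySem.List.dedup t).countP
        (fun x => (pvWinL t w (m + 1)).count x == K)) : Int)) :
    (if ((m : Int) ≥ (w : Int) - 1 ∧ atk2 = (dN : Int)) then total + 1 else total)
      = total + (if decide (w ≤ m + 1) && pvV (K : Int) (pvWinL t w (m + 1)) then 1 else 0) := by
  by_cases hwm : w ≤ m + 1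
  · have hlen : (pvWinL t w (m + 1)).length = w := pvWinL_len t w (m + 1) hm1 hwm
    have hiff := pvAtk_iff K dN hK (PySem.List.dedup t) (pvWinL t w (m + 1))
      (PySem.List.nodup_dedup t)
      (fun x hx => (PySem.List.mem_dedup t x).mpr (pvWinL_sub t w (m + 1) x hx))
      (by rw [hlen, hdw])
    have hge : ((m : Int) ≥ (w : Int) - 1) := by omega
    by_cases hv : pvV (K : Int) (pvWinL t w (m + 1)) = true
    · have hcnt : (PySem.List.dedup t).countP
          (fun x => (pvWinL t w (m + 1)).count x == K) = dN := hiff.mpr hv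
      rw [if_pos ⟨hge, by rw [hatk2, hcnt]⟩, hv]
      simp [hwm]
    · have hne : atk2 ≠ (dN : Int) := by
        rw [hatk2]
        intro hx
        exact hv (hiff.mp (by exact_mod_cast hx))
      rw [if_neg (by tauto)]
      simp [Bool.not_eq_true] at hv
      simp [hv]
  · have hlt : ¬((m : Int) ≥ (w : Int) - 1) := by omega
    rw [if_neg (by tauto)]
    have : ¬ (w ≤ m + 1) := hwm
    simp [this]

lemma pvStepB_step (t q rest : List Char) (c : Char) (K dN w : Nat)
    (hK : 1 ≤ K) (hw : 1 ≤ w) (hdw : w = dN * K)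
    (ht : t = q ++ c :: rest) (cnt : PySem.Dict Char Int) (atk total : Int)
    (hcnt : ∀ x, cnt.getD x 0 = ((pvWinL t w q.length).count x : Int))
    (hatk : atk = (((PySem.List.dedup t).countP
        (fun x => (pvWinL t w q.length).count x == K)) : Int)) :
    (∀ x, (pvStepB t (K : Int) (w : Int) (dN : Int) (cnt, atk, total) ((q.length : Int), c)).1.getD x 0
        = ((pvWinL t w (q.length + 1)).count x : Int))
    ∧ (pvStepB t (K : Int) (w : Int) (dN : Int) (cnt, atk, total) ((q.length : Int), c)).2.1
        = (((PySem.List.dedup t).countP (fun x => (pvWinL t w (q.length + 1)).count x == K)) : Int)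
    ∧ (pvStepB t (K : Int) (w : Int) (dN : Int) (cnt, atk, total) ((q.length : Int), c)).2.2
        = total + (if decide (w ≤ q.length + 1) && pvV (K : Int) (pvWinL t w (q.length + 1)) then 1 else 0) := by
  subst ht
  set t := q ++ c :: rest with ht
  set m := q.length with hm
  have hmlt : m < t.length := by rw [ht]; simp [hm]
  have htm : t.take m = q := by rw [ht, hm]; simp
  have htc : t[m]'hmlt = c := by
    show (q ++ c :: rest)[m]'(by simpa [ht] using hmlt) = c
    rw [List.getElem_append_right (by omega)]
    simp [hm]
  have htm1 : t.take (m + 1) = q ++ [c] := by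
    rw [List.take_succ_eq_append_getElem hmlt, htm, htc]
  have hwin_m : pvWinL t w m = q.drop (m - w) := by rw [pvWinL, htm]
  have hwin_m1 : pvWinL t w (m + 1) = (q ++ [c]).drop (m + 1 - w) := by rw [pvWinL, htm1]
  have hmid : (q ++ [c]).drop (m - w) = pvWinL t w m ++ [c] := by
    rw [hwin_m, List.drop_append_of_le_length (by omega)]
  have hcmem : c ∈ PySem.List.dedup t := by
    rw [PySem.List.mem_dedup, ht]; simp
  have hnodup := PySem.List.nodup_dedup t
  set mid := (q ++ [c]).drop (m - w) with hmiddef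
  have hmidc : mid.count c = (pvWinL t w m).count c + 1 := by rw [hmid]; simp
  have hmidx : ∀ x, x ≠ c → mid.count x = (pvWinL t w m).count x := by
    intro x hx
    rw [hmid, List.count_append, List.count_singleton]
    simp [Ne.symm hx]
  have hcnt1 : ∀ x, (cnt.insert c (cnt.getD c 0 + 1)).getD x 0 = (mid.count x : Int) := by
    intro x
    rw [PySem.Dict.getD_insert]
    by_cases hx : x = c
    · subst hx; rw [if_pos rfl, hcnt, hmidc]; push_cast; ring
    · rw [if_neg hx, hcnt, hmidx x hx]
  have hatk1 : (if (cnt.insert c (cnt.getD c 0 + 1)).getD c 0 = ((K : Nat) : Int) then atk + 1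
        else if (cnt.insert c (cnt.getD c 0 + 1)).getD c 0 = ((K : Nat) : Int) + 1 then atk - 1 else atk)
      = (((PySem.List.dedup t).countP (fun x => mid.count x == K)) : Int) := by
    rw [pvCountP_flip (PySem.List.dedup t) hnodup c hcmem
      (fun x => (pvWinL t w m).count x == K) (fun x => mid.count x == K)
      (fun x _ hx => by
        show (mid.count x == K) = ((pvWinL t w m).count x == K)
        rw [hmidx x hx])]
    rw [hcnt1 c, ← hatk]
    by_cases h1 : mid.count c = K
    · rw [if_pos (by exact_mod_cast h1)]
      have h2 : (pvWinL t w m).count c ≠ K := by omega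
      simp [h1, h2]
    · rw [if_neg (by exact_mod_cast h1)]
      by_cases h2 : mid.count c = K + 1
      · rw [if_pos (by push_cast [h2]; ring)]
        have h3 : (pvWinL t w m).count c = K := by omega
        simp [h1, h3]
      · rw [if_neg (by intro hx; exact h2 (by exact_mod_cast hx))]
        have h3 : (pvWinL t w m).count c ≠ K := by omega
        simp [h1, h3]
  by_cases hcase : w ≤ m
  · -- removal happens
    have higw : ((m : Int) ≥ (w : Int)) := by exact_mod_cast hcase
    have hqc : m - w < q.length := by omega
    have hidx : (m : Int) - (w : Int) = ((m - w : Nat) : Int) := by push_cast [hcase]; ring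
    have ho : PySem.List.pyGetD t ((m : Int) - (w : Int)) ' ' = t[m - w]'(by omega) := by
      rw [hidx, PySem.List.pyGetD_natCast, List.getD_eq_getElem _ _ (by omega)]
    set o := t[m - w]'(by omega) with hodef
    have homem : o ∈ PySem.List.dedup t := by
      rw [PySem.List.mem_dedup]; exact List.getElem_mem _
    have hsplit : mid = o :: pvWinL t w (m + 1) := by
      rw [hmiddef, hwin_m1, List.drop_eq_getElem_cons (by simp [hm])]
      congr 1
      · rw [List.getElem_append_left hqc, hodef]
        show q[m - w] = (q ++ c :: rest)[m - w]'(by simpa [ht] using (by omega : m - w < t.length))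
        rw [List.getElem_append_left hqc]
      · congr 1
        omega
    have hwm1c : ∀ x, x ≠ o → (pvWinL t w (m + 1)).count x = mid.count x := by
      intro x hx
      rw [hsplit, List.count_cons]
      simp [Ne.symm hx]
    have hwm1o : (pvWinL t w (m + 1)).count o + 1 = mid.count o := by
      rw [hsplit, List.count_cons]; simp
    -- expand the step
    have hPS : pvStepB t (K : Int) (w : Int) (dN : Int) (cnt, atk, total) ((m : Int), c)
        = (let cnt1 := cnt.insert c (cnt.getD c 0 + 1);
           let atk1 := if cnt1.getD c 0 = (K : Int) then atk + 1
             else if cnt1.getD c 0 = (K : Int) + 1 then atk - 1 else atk;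
           let o' := PySem.List.pyGetD t ((m : Int) - (w : Int)) ' ';
           let cnt2 := cnt1.insert o' (cnt1.getD o' 0 - 1);
           let atk2 := if cnt2.getD o' 0 = (K : Int) then atk1 + 1
             else if cnt2.getD o' 0 = (K : Int) - 1 then atk1 - 1 else atk1;
           (cnt2, atk2,
             if ((m : Int) ≥ (w : Int) - 1 ∧ atk2 = (dN : Int)) then total + 1 else total)) := by
      show (if ((m : Int) ≥ (w : Int)) then _ else _, _, _) = _
      simp only [if_pos higw]
    rw [hPS]
    simp only [ho]
    set cnt1 := cnt.insert c (cnt.getD c 0 + 1) with hcnt1def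
    have hcnt2 : ∀ x, (cnt1.insert o (cnt1.getD o 0 - 1)).getD x 0
        = ((pvWinL t w (m + 1)).count x : Int) := by
      intro x
      rw [PySem.Dict.getD_insert]
      by_cases hx : x = o
      · subst hx; rw [if_pos rfl, hcnt1 o]; omega
      · rw [if_neg hx, hcnt1 x, hwm1c x hx]
    have hatk2 : (if (cnt1.insert o (cnt1.getD o 0 - 1)).getD o 0 = (K : Int) then
          (if cnt1.getD c 0 = (K : Int) then atk + 1
            else if cnt1.getD c 0 = (K : Int) + 1 then atk - 1 else atk) + 1
        else if (cnt1.insert o (cnt1.getD o 0 - 1)).getD o 0 = (K : Int) - 1 then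
          (if cnt1.getD c 0 = (K : Int) then atk + 1
            else if cnt1.getD c 0 = (K : Int) + 1 then atk - 1 else atk) - 1
        else (if cnt1.getD c 0 = (K : Int) then atk + 1
            else if cnt1.getD c 0 = (K : Int) + 1 then atk - 1 else atk))
        = (((PySem.List.dedup t).countP (fun x => (pvWinL t w (m + 1)).count x == K)) : Int) := by
      rw [hatk1]
      rw [pvCountP_flip (PySem.List.dedup t) hnodup o homem
        (fun x => mid.count x == K) (fun x => (pvWinL t w (m + 1)).count x == K)
        (fun x _ hx => by
          show ((pvWinL t w (m + 1)).count x == K) = (mid.count x == K)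
          rw [hwm1c x hx])]
      rw [hcnt2 o]
      by_cases h1 : (pvWinL t w (m + 1)).count o = K
      · rw [if_pos (by exact_mod_cast h1)]
        have h2 : mid.count o ≠ K := by omega
        simp [h1, h2]
      · rw [if_neg (by exact_mod_cast h1)]
        by_cases h2 : mid.count o = K
        · rw [if_pos (by push_cast [← hwm1o] at h2 ⊢; omega)]
          simp [h1, h2]
        · rw [if_neg (by push_cast [← hwm1o] at h2 ⊢; omega)]
          simp [h1, h2]
    refine ⟨?_, ?_, ?_⟩
    · intro x
      exact hcnt2 x
    · exact hatk2
    · show (if ((m : Int) ≥ (w : Int) - 1 ∧ _ = (dN : Int)) then total + 1 else total) = _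
      rw [hatk2]
      exact pvTot_eq t K dN w m hK hdw (by omega) _ total rfl
  · -- no removal
    have hnigw : ¬((m : Int) ≥ (w : Int)) := by
      intro hx
      exact hcase (by exact_mod_cast hx)
    have hmid_eq : pvWinL t w (m + 1) = mid := by
      rw [hwin_m1, hmiddef]
      congr 1
      omega
    have hPS : pvStepB t (K : Int) (w : Int) (dN : Int) (cnt, atk, total) ((m : Int), c)
        = (let cnt1 := cnt.insert c (cnt.getD c 0 + 1);
           let atk1 := if cnt1.getD c 0 = (K : Int) then atk + 1
             else if cnt1.getD c 0 = (K : Int) + 1 then atk - 1 else atk;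
           (cnt1, atk1,
             if ((m : Int) ≥ (w : Int) - 1 ∧ atk1 = (dN : Int)) then total + 1 else total)) := by
      show (if ((m : Int) ≥ (w : Int)) then _ else _, _, _) = _
      simp only [if_neg hnigw]
    rw [hPS]
    refine ⟨?_, ?_, ?_⟩
    · intro x
      show (cnt.insert c (cnt.getD c 0 + 1)).getD x 0 = _
      rw [hcnt1 x, hmid_eq]
    · show (if _ then atk + 1 else if _ then atk - 1 else atk) = _
      rw [hmid_eq]
      exact hatk1
    · show (if ((m : Int) ≥ (w : Int) - 1 ∧ _ = (dN : Int)) then total + 1 else total) = _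
      have h1 := hatk1
      rw [← hmid_eq] at h1
      rw [h1]
      exact pvTot_eq t K dN w m hK hdw (by omega) _ total rfl

lemma pvStepB_fold (t : List Char) (K dN w : Nat) (hK : 1 ≤ K) (hw : 1 ≤ w) (hdw : w = dN * K) :
    ∀ (rest q : List Char) (cnt : PySem.Dict Char Int) (atk total : Int),
    t = q ++ rest →
    (∀ x, cnt.getD x 0 = ((pvWinL t w q.length).count x : Int)) →
    atk = (((PySem.List.dedup t).countP (fun x => (pvWinL t w q.length).count x == K)) : Int) →
    ((PySem.List.enumerate rest (q.length : Int)).foldl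
        (pvStepB t (K : Int) (w : Int) (dN : Int)) (cnt, atk, total)).2.2
      = total + ((List.range rest.length).countP
          (fun e => decide (w ≤ q.length + e + 1)
            && pvV (K : Int) (pvWinL t w (q.length + e + 1))) : Int) := by
  intro rest
  induction rest with
  | nil =>
    intro q cnt atk total ht hcnt hatk
    simp [PySem.List.enumerate]
  | cons c rest ih =>
    intro q cnt atk total ht hcnt hatk
    rw [PySem.List.enumerate_cons, List.foldl_cons]
    obtain ⟨h1, h2, h3⟩ := pvStepB_step t q rest c K dN w hK hw hdw ht cnt atk total hcnt hatk
    set r := pvStepB t (K : Int) (w : Int) (dN : Int) (cnt, atk, total) ((q.length : Int), c) with hr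
    have hql : ((q ++ [c]).length : Int) = (q.length : Int) + 1 := by simp
    have hrw : List.foldl (pvStepB t (K : Int) (w : Int) (dN : Int)) r
          (PySem.List.enumerate rest ((q.length : Int) + 1))
        = List.foldl (pvStepB t (K : Int) (w : Int) (dN : Int)) (r.1, r.2.1, r.2.2)
          (PySem.List.enumerate rest (((q ++ [c]).length : Int))) := by
      rw [hql]
    rw [hrw]
    rw [ih (q ++ [c]) r.1 r.2.1 r.2.2 (by rw [ht]; simp)
      (by simpa using h1) (by simpa using h2)]
    rw [h3]
    have hsplit : (List.range (c :: rest).length).countP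
          (fun e => decide (w ≤ q.length + e + 1)
            && pvV (K : Int) (pvWinL t w (q.length + e + 1)))
        = (if decide (w ≤ q.length + 1) && pvV (K : Int) (pvWinL t w (q.length + 1)) then 1 else 0)
          + (List.range rest.length).countP
            (fun e => decide (w ≤ (q ++ [c]).length + e + 1)
              && pvV (K : Int) (pvWinL t w ((q ++ [c]).length + e + 1))) := by
      show (List.range (rest.length + 1)).countP _ = _
      rw [List.range_succ_eq_map, List.countP_cons, List.countP_map]
      have hfun : ((fun e => decide (w ≤ q.length + e + 1)
            && pvV (K : Int) (pvWinL t w (q.length + e + 1))) ∘ Nat.succ)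
          = (fun e => decide (w ≤ (q ++ [c]).length + e + 1)
            && pvV (K : Int) (pvWinL t w ((q ++ [c]).length + e + 1))) := by
        funext e
        have harg : q.length + Nat.succ e + 1 = (q ++ [c]).length + e + 1 := by simp; omega
        simp only [Function.comp_apply, harg]
      rw [hfun]
      simp only [Nat.add_zero]
      omega
    rw [hsplit]
    push_cast
    ring

lemma pvOuterB_spec (t : List Char) (K : Nat) (hK : 1 ≤ K) :
    ∀ (fuel a : Nat), 1 ≤ a → (PySem.Set.ofList t).length + 1 - a = fuel →
    ∀ total : Int,
      pvOuterB t (K : Int) (PySem.List.pyRange (a : Int) (((PySem.Set.ofList t).length : Int) + 1) 1) total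
        = total + ∑ j ∈ Finset.Ico a ((PySem.Set.ofList t).length + 1), (pvCnt K t (j * K) : Int) := by
  intro fuel
  induction fuel with
  | zero =>
    intro a ha hfa total
    set D := (PySem.Set.ofList t).length
    have haD : D + 1 ≤ a := by omega
    rw [PySem.List.pyRange_one_eq_nil (by exact_mod_cast haD), pvOuterB,
      Finset.Ico_eq_empty (by omega), Finset.sum_empty]
    ring
  | succ fuel ih =>
    intro a ha hfa total
    set D := (PySem.Set.ofList t).length with hD
    have haD : a ≤ D := by omega
    rw [PySem.List.pyRange_one_cons (by exact_mod_cast Nat.lt_succ_of_le haD)]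
    rw [pvOuterB]
    have hcast : (a : Int) * (K : Int) = ((a * K : Nat) : Int) := by push_cast; ring
    by_cases hbig : ((a : Int) * (K : Int) > (t.length : Int))
    · rw [if_pos hbig]
      have hbigN : t.length < a * K := by
        rw [hcast] at hbig
        exact_mod_cast hbig
      have hz : ∀ j ∈ Finset.Ico a (D + 1), (pvCnt K t (j * K) : Int) = 0 := by
        intro j hj
        rw [Finset.mem_Ico] at hj
        rw [pvCnt_zero_of_big K (j * K) t
          (lt_of_lt_of_le hbigN (Nat.mul_le_mul_right K hj.1))]
        simp
      rw [Finset.sum_congr rfl hz, Finset.sum_const, smul_zero]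
      ring
    · rw [if_neg hbig]
      have hw1 : 1 ≤ a * K := Nat.mul_pos (by omega) hK
      have hfold := pvStepB_fold t K a (a * K) hK hw1 rfl t [] PySem.Dict.empty 0 total
        (by simp)
        (by
          intro x
          rw [PySem.Dict.getD_empty]
          simp [pvWinL])
        (by
          simp only [List.length_nil]
          have hzz : (PySem.List.dedup t).countP
              (fun x => (pvWinL t (a * K) 0).count x == K) = 0 := by
            rw [List.countP_eq_zero]
            intro x _
            simp [pvWinL]
            omega
          rw [hzz]
          simp)
      simp only [List.length_nil, Nat.cast_zero, Nat.zero_add] at hfold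
      rw [hcast, hfold, pvCntE_eq K (a * K) hw1 t]
      have hcast2 : ((a : Int) + 1) = (((a + 1 : Nat)) : Int) := by push_cast; ring
      rw [hcast2]
      rw [ih (a + 1) (by omega) (by omega) (total + (pvCnt K t (a * K) : Int))]
      conv_rhs => rw [Finset.sum_eq_sum_Ico_succ_bot (show a < D + 1 by omega)
        (fun j => (pvCnt K t (j * K) : Int))]
      ring

-- ===== VERDICT (by name: the statement is the Claim_ definition above) =====
theorem count_substrings_with_k_freq_optimized_spec : Claim_equal_count_substrings_with_k_freq_optimized := by
  intro s k _
  unfold Spec_count_substrings_with_k_freq_optimized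

  by_cases hk : k ≤ 0
  · simp [count_substrings_with_k_freq_optimized, count_substrings_with_k_freq_optimized_alt, hk]
  · have hK1 : 1 ≤ k.toNat := by omega
    have hkK : k = (k.toNat : Int) := by omega
    set K := k.toNat with hKdef
    set t := s.toList with htdef
    have hlen : PySem.Set.len (PySem.Set.ofList t) = (((PySem.Set.ofList t).length : Nat) : Int) := rfl
    by_cases ht0 : t = []
    · rw [count_substrings_with_k_freq_optimized, if_pos (Or.inl ht0),
        count_substrings_with_k_freq_optimized_alt, if_neg hk]
      rw [← htdef, ht0]
      show 0 = pvOuterB [] k (PySem.List.pyRange 1 (PySem.Set.len (PySem.Set.ofList ([] : List Char)) + 1) 1) 0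
      rw [show PySem.Set.len (PySem.Set.ofList ([] : List Char)) = 0 from rfl]
      rw [show (0 : Int) + 1 = 1 from rfl, PySem.List.pyRange_one_eq_nil (le_refl 1)]
      rfl
    · rw [count_substrings_with_k_freq_optimized, if_neg (by tauto),
        count_substrings_with_k_freq_optimized_alt, if_neg hk, ← htdef]
      set D := (PySem.Set.ofList t).length with hDdef
      rw [hkK, pvA_sum K t t.length 0, hlen]
      have hsp := pvOuterB_spec t K hK1 D 1 (le_refl 1) (by omega) 0
      norm_num at hsp
      rw [hsp]
      rw [Finset.sum_Ico_eq_sum_range (fun j => (pvCnt K t (j * K) : Int)) 1 (D + 1)]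
      simp only [Nat.add_sub_cancel]
      have hA : ∑ i ∈ Finset.range t.length, (pvCA K t i : Int)
          = ∑ d ∈ Finset.range D, (pvCnt K t ((1 + d) * K) : Int) := by
        have h1 : ∀ i ∈ Finset.range t.length, (pvCA K t i : Int)
            = ∑ d ∈ Finset.range D, ((if pvP K t ((1 + d) * K) i then 1 else 0 : Nat) : Int) := by
          intro i _
          rw [pvCA_eq K hK1 t i, ← hDdef]
          push_cast
          rfl
        rw [Finset.sum_congr rfl h1, Finset.sum_comm]
        apply Finset.sum_congr rfl
        intro d _
        rw [pvCnt, pvCountP_range_sum]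
        push_cast
        rfl
      rw [hA]
      ring
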